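-- pv_equiv track=rewrite | github.com/Su-myat-phyu/Music_Playlist_Generator | backend/app/services/recommendation.py | _matches_exclusion_terms
-- ===== SOURCE A (Python) =====
-- from typing import List, Dict, Any, Tuple, Optional
--
-- def _matches_exclusion_terms(song: Dict[str, Any]) -> bool:
--     title_album_artist = " ".join([
--         str(song.get('title') or '').lower(),
--         str(song.get('album') or '').lower(),
--         str(song.get('artist') or '').lower(),
--     ])
--
--     # These are common iTunes search drifts that should not override a selected genre.
--     off_topic_terms = [
--         "baby", "babies", "lullaby", "lullabies", "sleeping baby",
--         "white noise", "waterfall sounds", "dog music", "music for pets",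
--         "meditation music", "nature sounds",
--     ]
--
--     return any(term in title_album_artist for term in off_topic_terms)
-- ===== SOURCE B (Python) =====
-- _OFF_TOPIC_TERMS = [
--     "baby", "babies", "lullaby", "lullabies", "sleeping baby",
--     "white noise", "waterfall sounds", "dog music", "music for pets",
--     "meditation music", "nature sounds",
-- ]
--
--
-- def _matches_exclusion_terms(song):
--     text = " ".join(
--         str(song.get(field) or '').lower()
--         for field in ("title", "album", "artist")
--     )
--     # Index the terms by their first character once, then scan the string
--     # left to right, testing as prefixes only the terms whose first
--     # character matches the current position.
--     buckets = {}
--     for term in _OFF_TOPIC_TERMS: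
--         buckets.setdefault(term[0], []).append(term)
--     for i, ch in enumerate(text):
--         if any(text.startswith(term, i) for term in buckets.get(ch, ())):
--             return True
--     return False
-- ===== Notes on version B (the rewrite author's own statement) =====
-- stated objective: alternative
-- what changed: B replaces A's eleven independent 'term in string' substring searches with a single left-to-right scan of the joined string, using a first-character bucket index of the terms so that at each position only terms starting with that character are tested as prefixes.
import Mathlib
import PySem

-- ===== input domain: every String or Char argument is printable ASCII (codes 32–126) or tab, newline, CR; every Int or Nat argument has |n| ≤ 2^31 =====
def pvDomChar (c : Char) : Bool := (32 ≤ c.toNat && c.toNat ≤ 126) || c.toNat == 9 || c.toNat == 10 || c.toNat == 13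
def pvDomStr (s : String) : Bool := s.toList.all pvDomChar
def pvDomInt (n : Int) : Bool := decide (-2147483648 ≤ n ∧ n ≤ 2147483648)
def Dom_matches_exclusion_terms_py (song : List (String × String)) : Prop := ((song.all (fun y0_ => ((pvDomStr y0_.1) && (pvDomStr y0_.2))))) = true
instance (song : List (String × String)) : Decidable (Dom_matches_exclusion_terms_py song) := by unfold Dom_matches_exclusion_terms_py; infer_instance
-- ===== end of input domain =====

-- B scans the joined lowercased string once with a first-character bucket index of the terms
-- instead of A's per-term substring tests (alternative algorithm, same result).


-- the shared constant term list (identical literal in both Pythons)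
def pvOffTopicTerms : List String :=
  ["baby", "babies", "lullaby", "lullabies", "sleeping baby",
   "white noise", "waterfall sounds", "dog music", "music for pets",
   "meditation music", "nature sounds"]

-- ===== PORT A =====
-- " ".join([str(song.get('title') or '').lower(), …]); str() of a str is itself and
-- `x or ''` maps both a missing key and '' to '' (exact: getD "" agrees on both cases)
def matches_exclusion_terms_py (song : List (String × String)) : Bool :=
  let d := PySem.Dict.mk song
  let title_album_artist := PySem.Str.join " "
    [PySem.Str.lower ((d.get? "title").getD ""),
     PySem.Str.lower ((d.get? "album").getD ""),
     PySem.Str.lower ((d.get? "artist").getD "")]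
  pvOffTopicTerms.any (fun term => PySem.Str.isIn term title_album_artist)

-- ===== PORT B =====
-- term[0] (every off-topic term is a nonempty literal, so this is exact)
def pvFirstChar (t : String) : Char := t.toList.headD ' '

-- buckets = {}; for term in terms: buckets.setdefault(term[0], []).append(term)
def pvBuckets : PySem.Dict Char (List String) :=
  pvOffTopicTerms.foldl (fun d t => d.modify (pvFirstChar t) [] (· ++ [t])) PySem.Dict.empty

-- for i, ch in enumerate(text): if any(text.startswith(term, i) for term in buckets.get(ch, ())): return True
def pvScanB (buckets : PySem.Dict Char (List String)) : List Char → Bool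
  | [] => false
  | c :: rest =>
      ((buckets.getD c []).any (fun t => t.toList.isPrefixOf (c :: rest))) || pvScanB buckets rest

def matches_exclusion_terms_py_alt (song : List (String × String)) : Bool :=
  let d := PySem.Dict.mk song
  let text := PySem.Str.join " "
    (["title", "album", "artist"].map (fun field => PySem.Str.lower ((d.get? field).getD "")))
  pvScanB pvBuckets text.toList

-- ===== PRECONDITION & SPEC =====
def Spec_matches_exclusion_terms_py (song : List (String × String)) (out : Bool) : Prop := out = matches_exclusion_terms_py_alt song
instance (song : List (String × String)) (out : Bool) : Decidable (Spec_matches_exclusion_terms_py song out) := by unfold Spec_matches_exclusion_terms_py; infer_instance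

-- ===== CLAIM (what is proved, stated in full; the proofs are below) =====
def Claim_equal_matches_exclusion_terms_py : Prop := ∀ (song : List (String × String)), Dom_matches_exclusion_terms_py song → Spec_matches_exclusion_terms_py song (matches_exclusion_terms_py song)

-- ===== LEMMAS AND PROOFS =====

-- every off-topic term is nonempty
theorem pv_terms_ne_nil : ∀ t ∈ pvOffTopicTerms, t.toList ≠ [] := by decide

-- the bucket for character c holds exactly the terms whose first character is c, in order
theorem pv_buckets_getD (c : Char) :
    pvBuckets.getD c [] = pvOffTopicTerms.filter (fun t => pvFirstChar t == c) := by
  have h : pvBuckets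
      = (pvOffTopicTerms.map (fun t => (pvFirstChar t, t))).foldl
          (fun d p => d.modify p.1 [] (· ++ [p.2])) PySem.Dict.empty := by
    rw [List.foldl_map]; rfl
  rw [h, PySem.Dict.getD_foldl_modify_append]
  simp [List.filter_map, Function.comp_def]

-- a term that is a prefix of c :: rest starts with c
theorem pv_first_of_prefix {t : String} (ht : t.toList ≠ []) {c : Char} {rest : List Char}
    (h : t.toList <+: c :: rest) : pvFirstChar t = c := by
  rcases hl : t.toList with _ | ⟨hd, tl⟩
  · exact absurd hl ht
  · rw [hl] at h
    rcases h with ⟨s, hs⟩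
    simp [pvFirstChar, hl, List.cons.injEq] at hs ⊢
    exact hs.1

-- the scan finds exactly the strings with some off-topic term as an infix
theorem pv_scan_iff (l : List Char) :
    pvScanB pvBuckets l = true ↔ ∃ t ∈ pvOffTopicTerms, t.toList <:+: l := by
  induction l with
  | nil =>
      simp only [pvScanB, List.infix_nil]
      constructor
      · intro h; exact absurd h (by decide)
      · rintro ⟨t, ht, h⟩; exact absurd h (pv_terms_ne_nil t ht)
  | cons c rest ih =>
      simp only [pvScanB, Bool.or_eq_true, List.any_eq_true, ih, pv_buckets_getD,
        List.mem_filter]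
      constructor
      · rintro (⟨t, ⟨ht, _⟩, hp⟩ | ⟨t, ht, hi⟩)
        · exact ⟨t, ht, ((List.infix_cons_iff).mpr (Or.inl (by simpa using hp)))⟩
        · exact ⟨t, ht, (List.infix_cons_iff).mpr (Or.inr hi)⟩
      · rintro ⟨t, ht, hi⟩
        rcases (List.infix_cons_iff).mp hi with hp | hi'
        · exact Or.inl ⟨t, ⟨ht, by simp [pv_first_of_prefix (pv_terms_ne_nil t ht) hp]⟩,
            by simpa using hp⟩
        · exact Or.inr ⟨t, ht, hi'⟩

-- ===== VERDICT (by name: the statement is the Claim_ definition above) =====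
theorem matches_exclusion_terms_py_spec : Claim_equal_matches_exclusion_terms_py := by
  intro song _
  unfold Spec_matches_exclusion_terms_py matches_exclusion_terms_py matches_exclusion_terms_py_alt
  simp only [List.map]
  rw [Bool.eq_iff_iff]
  rw [pv_scan_iff]
  simp only [List.any_eq_true, PySem.Str.isIn_iff_infix]
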